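-- pv_equiv track=rewrite | github.com/KalykeXIII/Competitive-Programming-Archive | 2020 Comp/Hashcode2020.py | re_score
-- ===== SOURCE A (Python) =====
-- def re_score(lib,s):
--     score = 0
--     books = []
--     for i in range(len(lib[1])):
--         score += s[lib[1][i]]
--         books += [lib[1][i]]
--         s[lib[1][i]] = 0
--     return score, s, books
-- ===== SOURCE B (Python) =====
-- def re_score(lib, s):
--     # Collect the books, zero their score cells in place, and read the total
--     # score off as the drop in sum(s): each touched cell contributes its
--     # original value exactly once, however often it is listed.
--     books = list(lib[1])
--     before = sum(s)
--     for j in books: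
--         s[j] = 0
--     return before - sum(s), s, books
-- ===== Notes on version B (the rewrite author's own statement) =====
-- stated objective: simpler
-- what changed: Replaces the fused per-index read-accumulate-zero loop by a sum-difference: copy lib[1], take sum(s), zero the listed cells, and return sum-before minus sum-after, so the score needs no per-step accumulator and duplicates are handled implicitly.
import Mathlib
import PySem

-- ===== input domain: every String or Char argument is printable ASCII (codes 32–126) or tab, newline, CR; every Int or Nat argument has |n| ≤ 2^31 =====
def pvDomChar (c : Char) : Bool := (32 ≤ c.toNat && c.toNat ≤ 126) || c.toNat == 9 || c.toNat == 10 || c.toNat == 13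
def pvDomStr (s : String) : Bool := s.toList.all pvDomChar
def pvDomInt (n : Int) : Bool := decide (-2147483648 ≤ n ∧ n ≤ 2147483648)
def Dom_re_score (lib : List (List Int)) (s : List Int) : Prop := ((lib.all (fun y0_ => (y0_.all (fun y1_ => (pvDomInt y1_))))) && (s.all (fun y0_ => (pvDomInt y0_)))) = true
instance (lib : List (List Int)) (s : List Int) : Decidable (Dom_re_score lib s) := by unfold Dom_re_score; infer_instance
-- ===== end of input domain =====

-- B replaces A's fused read-accumulate-zero loop by a sum-difference: copy lib[1], zero the listed cells, score = sum(s) before minus after (objective: simpler).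
-- Equivalence is about the RETURN value; both Pythons mutate s in place identically.


-- ===== PORT A =====
def re_score (lib : List (List Int)) (s : List Int) : Int × List Int × List Int :=
  (PySem.List.pyRange 0 ((PySem.List.pyGetD lib 1 []).length : Int) 1).foldl
    (fun (st : Int × List Int × List Int) i =>
      let j := PySem.List.pyGetD (PySem.List.pyGetD lib 1 []) i 0
      (st.1 + PySem.List.pyGetD st.2.1 j 0,
       PySem.List.pySetD st.2.1 j 0,
       st.2.2 ++ [j]))
    (0, s, [])

-- ===== PORT B =====
def re_score_alt (lib : List (List Int)) (s : List Int) : Int × List Int × List Int :=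
  let books := PySem.List.pyGetD lib 1 []
  let before := s.sum
  let s' := books.foldl (fun u j => PySem.List.pySetD u j 0) s
  (before - s'.sum, s', books)

-- ===== PRECONDITION & SPEC =====
-- Pre_ = exactly the inputs where Python A returns: lib[1] exists and every index into s is in Python range.
def Pre_re_score (lib : List (List Int)) (s : List Int) : Prop :=
  2 ≤ lib.length ∧ ∀ x ∈ lib.getD 1 [], -(s.length : Int) ≤ x ∧ x < (s.length : Int)
instance (lib : List (List Int)) (s : List Int) : Decidable (Pre_re_score lib s) := by unfold Pre_re_score; infer_instance

def pvWitness_re_score : List (List Int) × List Int := ([[9, 9], [0, 2, 0, -1]], [5, 7, 3])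

def Spec_re_score (lib : List (List Int)) (s : List Int) (out : Int × List Int × List Int) : Prop := out = re_score_alt lib s
instance (lib : List (List Int)) (s : List Int) (out : Int × List Int × List Int) : Decidable (Spec_re_score lib s out) := by unfold Spec_re_score; infer_instance

-- ===== CLAIM (what is proved, stated in full; the proofs are below) =====
def Claim_equal_re_score : Prop := ∀ (lib : List (List Int)) (s : List Int), Dom_re_score lib s → Pre_re_score lib s → Spec_re_score lib s (re_score lib s)

-- ===== LEMMAS AND PROOFS =====

-- zeroing one cell drops the sum by exactly that cell's value
lemma sum_set_zero (t : List Int) : ∀ (k : Nat) (h : k < t.length), (t.set k 0).sum = t.sum - t[k] := by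
  induction t with
  | nil => intro k h; simp at h
  | cons a t ih =>
    intro k h
    cases k with
    | zero => simp
    | succ k =>
      have hk : k < t.length := by simpa using h
      simp [List.set, ih k hk]
      ring

-- a valid Python index j lands at nat position k with get = t[k] and set = t.set k
lemma py_idx_cases (t : List Int) (j : Int)
    (h1 : -(t.length : Int) ≤ j) (h2 : j < (t.length : Int)) :
    ∃ (k : Nat) (hk : k < t.length),
      PySem.List.pyGetD t j 0 = t[k] ∧ PySem.List.pySetD t j 0 = t.set k 0 := by
  by_cases h : 0 ≤ j
  · refine ⟨j.toNat, by omega, ?_, PySem.List.pySetD_of_nonneg t 0 h⟩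
    rw [PySem.List.pyGetD_eq_getElem t 0 h h2]
  · refine ⟨(j + t.length).toNat, by omega, ?_, ?_⟩
    · simp [PySem.List.pyGetD, PySem.List.pyGet?, PySem.List.pyIdx?, h, h1]
      rw [show t.length - (-j).toNat = (j + t.length).toNat by omega,
          List.getElem?_eq_getElem (show (j + t.length).toNat < t.length by omega)]
      rfl
    · simp [PySem.List.pySetD, PySem.List.pySet?, PySem.List.pyIdx?, h, h1]
      rw [show t.length - (-j).toNat = (j + t.length).toNat by omega]

-- one write: read + new sum = old sum, and the length is unchanged
lemma step_sum (t : List Int) (j : Int)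
    (h1 : -(t.length : Int) ≤ j) (h2 : j < (t.length : Int)) :
    PySem.List.pyGetD t j 0 + (PySem.List.pySetD t j 0).sum = t.sum := by
  obtain ⟨k, hk, hg, hs⟩ := py_idx_cases t j h1 h2
  rw [hg, hs, sum_set_zero t k hk]
  ring

-- main invariant: A's fused loop = (score + sum-drop, zero-fold, bk ++ xs)
lemma loopA (xs : List Int) : ∀ (t : List Int) (score : Int) (bk : List Int),
    (∀ x ∈ xs, -(t.length : Int) ≤ x ∧ x < (t.length : Int)) →
    xs.foldl (fun (st : Int × List Int × List Int) j =>
        (st.1 + PySem.List.pyGetD st.2.1 j 0,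
         PySem.List.pySetD st.2.1 j 0,
         st.2.2 ++ [j])) (score, t, bk)
      = (score + t.sum - (xs.foldl (fun u j => PySem.List.pySetD u j 0) t).sum,
         xs.foldl (fun u j => PySem.List.pySetD u j 0) t,
         bk ++ xs) := by
  induction xs with
  | nil => intro t score bk _; simp
  | cons x xs ih =>
    intro t score bk hb
    obtain ⟨hx1, hx2⟩ := hb x List.mem_cons_self
    have hlen : (PySem.List.pySetD t x 0).length = t.length := PySem.List.length_pySetD t x 0
    rw [List.foldl_cons, ih (PySem.List.pySetD t x 0) (score + PySem.List.pyGetD t x 0) (bk ++ [x])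
          (by rw [hlen]; exact fun y hy => hb y (List.mem_cons_of_mem _ hy))]
    have hsum := step_sum t x hx1 hx2
    refine Prod.ext ?_ (Prod.ext rfl ?_)
    · show score + PySem.List.pyGetD t x 0 + (PySem.List.pySetD t x 0).sum - _ = score + t.sum - _
      simp only [List.foldl_cons]
      omega
    · simp

-- ===== VERDICT (by name: the statement is the Claim_ definition above) =====
theorem re_score_spec : Claim_equal_re_score := by
  intro lib s _ hpre
  obtain ⟨hlen, hbnd⟩ := hpre
  unfold Spec_re_score re_score re_score_alt
  have h1 : 1 < lib.length := by omega
  have hb1 : PySem.List.pyGetD lib 1 [] = lib.getD 1 [] := by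
    rw [PySem.List.pyGetD_eq_getElem lib ([] : List Int) (by omega) (by exact_mod_cast h1)]
    simp [List.getD_eq_getElem?_getD, List.getElem?_eq_getElem h1]
  rw [hb1]
  rw [PySem.List.foldl_pyRange_zero_pyGetD' (lib.getD 1 []) 0
        (fun (st : Int × List Int × List Int) j =>
          (st.1 + PySem.List.pyGetD st.2.1 j 0,
           PySem.List.pySetD st.2.1 j 0,
           st.2.2 ++ [j])) (0, s, [])]
  rw [loopA (lib.getD 1 []) s 0 [] hbnd]
  simp
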